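-- pv_equiv track=rewrite | github.com/thiagooqz/AnalisadorSintatico | gramatica.py | tokenizar_producao
-- ===== SOURCE A (Python) =====
-- def tokenizar_producao(direito, terminais): #Transforma o lado direito de uma produção em uma lista de token
--     if not direito:
--         return []
--
--     direito = direito.strip()
--     if not direito or direito == 'vazio' or direito == 'epsilon':
--         return []
--
--     if ' ' in direito:
--         return [token.strip() for token in direito.split() if token.strip()]
--
--     tokens = []
--     token_atual = ""
--
--     i = 0   # onde o simbolo termina e outro começa para entender cada palavra
--     while i < len(direito):
--         char = direito[i]
--
--         if char in terminais:
--             if token_atual: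
--                 tokens.append(token_atual)
--                 token_atual = ""
--             tokens.append(char)
--         else:
--             token_atual += char
--
--         i += 1
--
--     if token_atual:
--         tokens.append(token_atual)
--
--     return tokens
-- ===== SOURCE B (Python) =====
-- def tokenizar_producao(direito, terminais):
--     # Same guards and space-split branch as the original; the char loop is
--     # replaced by run-at-a-time emission (no token_atual flush state).
--     if not direito:
--         return []
--
--     direito = direito.strip()
--     if not direito or direito == 'vazio' or direito == 'epsilon':
--         return []
--
--     if ' ' in direito:
--         return [token.strip() for token in direito.split() if token.strip()]
--
--     term = set(terminais)
--     tokens = []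
--     resto = direito
--     while resto:
--         if resto[0] in term:
--             tokens.append(resto[0])
--             resto = resto[1:]
--         else:
--             j = 1
--             while j < len(resto) and resto[j] not in term:
--                 j += 1
--             tokens.append(resto[:j])
--             resto = resto[j:]
--     return tokens
-- ===== Notes on version B (the rewrite author's own statement) =====
-- stated objective: alternative
-- what changed: The char-by-char accumulator loop with a token_atual flush state is replaced by run-at-a-time emission: each maximal non-terminal run is located by an inner scan and appended as one slice, terminals emitted directly, with terminal lookup in a set built once; guards and the space-split branch are kept as in A.
import Mathlib
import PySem

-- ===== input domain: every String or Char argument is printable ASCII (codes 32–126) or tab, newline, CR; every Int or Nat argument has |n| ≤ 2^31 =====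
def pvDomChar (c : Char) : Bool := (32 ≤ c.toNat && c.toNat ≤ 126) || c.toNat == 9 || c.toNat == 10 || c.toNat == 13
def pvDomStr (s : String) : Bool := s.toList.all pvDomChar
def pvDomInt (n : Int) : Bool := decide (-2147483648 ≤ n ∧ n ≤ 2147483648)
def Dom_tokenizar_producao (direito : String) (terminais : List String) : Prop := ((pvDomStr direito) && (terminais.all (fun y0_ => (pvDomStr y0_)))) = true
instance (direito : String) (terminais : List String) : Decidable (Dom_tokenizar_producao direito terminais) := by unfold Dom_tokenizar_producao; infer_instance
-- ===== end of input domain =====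

-- B replaces A's char-by-char accumulator loop (token_atual flush state) by run-at-a-time
-- emission of maximal non-terminal runs; guards and the space-split branch are kept as in A.

-- ===== PORT A =====
-- A's while loop over i, carrying (tokens, token_atual), as recursion over the remaining chars
def tokALoop (terminais : List String) : List Char → List String → String → List String
  | [], tokens, tok => if tok ≠ "" then tokens ++ [tok] else tokens
  | c :: rest, tokens, tok =>
      if String.ofList [c] ∈ terminais then
        tokALoop terminais rest ((if tok ≠ "" then tokens ++ [tok] else tokens) ++ [String.ofList [c]]) ""
      else
        tokALoop terminais rest tokens (tok.push c)

def tokenizar_producao (direito : String) (terminais : List String) : List String :=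
  if direito = "" then []
  else
    -- direito = direito.strip() : the reassigned d is written out inline
    if PySem.Str.strip direito = "" ∨ PySem.Str.strip direito = "vazio" ∨ PySem.Str.strip direito = "epsilon" then []
    else if PySem.Str.isIn " " (PySem.Str.strip direito) then
      (PySem.Str.split₀ (PySem.Str.strip direito)).filterMap (fun token =>
        if PySem.Str.strip token ≠ "" then some (PySem.Str.strip token) else none)
    else
      tokALoop terminais (PySem.Str.strip direito).toList [] ""

-- ===== PORT B =====
-- the `while resto` loop of Source B: a terminal head is emitted alone; otherwise the inner
-- j-scan (`while j < len(resto) and resto[j] not in term`) computes the maximal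
-- non-terminal run (takeWhile) and resto[:j] / resto[j:] are the emitted run and the rest
def tokBLoop (term : List String) : List Char → List String
  | [] => []
  | c :: rest =>
      if String.ofList [c] ∈ term then
        String.ofList [c] :: tokBLoop term rest
      else
        String.ofList (c :: rest.takeWhile (fun x => !decide (String.ofList [x] ∈ term))) ::
          tokBLoop term (rest.dropWhile (fun x => !decide (String.ofList [x] ∈ term)))
  termination_by l => l.length
  decreasing_by
    · simp
    · exact Nat.lt_succ_of_le (List.length_dropWhile_le _ _)

def tokenizar_producao_alt (direito : String) (terminais : List String) : List String :=
  if direito = "" then []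
  else
    -- direito = direito.strip() : the reassigned d is written out inline
    if PySem.Str.strip direito = "" ∨ PySem.Str.strip direito = "vazio" ∨ PySem.Str.strip direito = "epsilon" then []
    else if PySem.Str.isIn " " (PySem.Str.strip direito) then
      (PySem.Str.split₀ (PySem.Str.strip direito)).filterMap (fun token =>
        if PySem.Str.strip token ≠ "" then some (PySem.Str.strip token) else none)
    else
      tokBLoop (PySem.Set.ofList terminais) (PySem.Str.strip direito).toList

-- ===== PRECONDITION & SPEC =====
def Spec_tokenizar_producao (direito : String) (terminais : List String) (out : List String) : Prop := out = tokenizar_producao_alt direito terminais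
instance (direito : String) (terminais : List String) (out : List String) : Decidable (Spec_tokenizar_producao direito terminais out) := by unfold Spec_tokenizar_producao; infer_instance

-- ===== CLAIM (what is proved, stated in full; the proofs are below) =====
def Claim_equal_tokenizar_producao : Prop := ∀ (direito : String) (terminais : List String), Dom_tokenizar_producao direito terminais → Spec_tokenizar_producao direito terminais (tokenizar_producao direito terminais)

-- ===== LEMMAS AND PROOFS =====

theorem ofList_push (p : List Char) (c : Char) :
    (String.ofList p).push c = String.ofList (p ++ [c]) := by
  apply String.toList_inj.mp; simp

-- a whole all-non-terminal list is one run
theorem tokBLoop_all_false (term : List String) (p : List Char)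
    (hp : ∀ c ∈ p, String.ofList [c] ∉ term) :
    tokBLoop term p = if p = [] then [] else [String.ofList p] := by
  cases p with
  | nil => simp [tokBLoop]
  | cons c rest =>
      have hc : String.ofList [c] ∉ term := hp c (by simp)
      have hrest : rest.takeWhile (fun x => !decide (String.ofList [x] ∈ term)) = rest :=
        List.takeWhile_eq_self_iff.mpr (by intro x hx; simp [hp x (by simp [hx])])
      have hdrop : rest.dropWhile (fun x => !decide (String.ofList [x] ∈ term)) = [] :=
        List.dropWhile_eq_nil_iff.mpr (by intro x hx; simp [hp x (by simp [hx])])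
      rw [tokBLoop]
      simp [hc, hrest, hdrop, tokBLoop]

-- takeWhile/dropWhile split an all-false run followed by a true element
theorem run_split (term : List String) (q : List Char) (c : Char) (l : List Char)
    (hq : ∀ x ∈ q, String.ofList [x] ∉ term) (hc : String.ofList [c] ∈ term) :
    (q ++ c :: l).takeWhile (fun x => !decide (String.ofList [x] ∈ term)) = q ∧
    (q ++ c :: l).dropWhile (fun x => !decide (String.ofList [x] ∈ term)) = c :: l := by
  induction q with
  | nil => simp [hc]
  | cons b q' ih =>
      have hb : String.ofList [b] ∉ term := hq b (by simp)
      have := ih (by intro x hx; exact hq x (by simp [hx]))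
      simp only [List.cons_append, List.takeWhile_cons, List.dropWhile_cons]
      simp [hb, this.1, this.2]

theorem tokBLoop_prepend_run (term : List String) (p : List Char) (c : Char) (l : List Char)
    (hp : ∀ x ∈ p, String.ofList [x] ∉ term) (hc : String.ofList [c] ∈ term) :
    tokBLoop term (p ++ c :: l) =
      (if p = [] then [] else [String.ofList p]) ++ tokBLoop term (c :: l) := by
  cases p with
  | nil => simp
  | cons a p' =>
      have ha : String.ofList [a] ∉ term := hp a (by simp)
      have hsplit := run_split term p' c l (by intro x hx; exact hp x (by simp [hx])) hc
      rw [List.cons_append, tokBLoop]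
      simp [ha, hsplit.1, hsplit.2]

-- the main loop invariant: A's loop with pending non-terminal prefix p equals B's loop on p ++ l
theorem tokALoop_eq (terminais term : List String)
    (hmem : ∀ x, x ∈ term ↔ x ∈ terminais) :
    ∀ (l : List Char) (tokens : List String) (p : List Char),
      (∀ c ∈ p, String.ofList [c] ∉ terminais) →
      tokALoop terminais l tokens (String.ofList p) = tokens ++ tokBLoop term (p ++ l) := by
  intro l
  induction l with
  | nil =>
      intro tokens p hp
      have := tokBLoop_all_false term p (by intro c hc; rw [hmem]; exact hp c hc)
      simp only [tokALoop, List.append_nil, this]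
      by_cases h : p = [] <;> simp [h]
  | cons c rest ih =>
      intro tokens p hp
      by_cases hc : String.ofList [c] ∈ terminais
      · have hc' : String.ofList [c] ∈ term := (hmem _).mpr hc
        rw [tokALoop]
        simp only [hc, if_pos]
        have h0 : ("" : String) = String.ofList [] := by simp
        rw [h0, ih _ [] (by simp)]
        rw [tokBLoop_prepend_run term p c rest
              (by intro x hx; rw [hmem]; exact hp x hx) hc']
        rw [tokBLoop]
        simp only [hc', if_pos, List.nil_append]
        by_cases h : p = [] <;> simp [h]
      · rw [tokALoop]
        simp only [hc, if_neg, not_false_iff]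
        rw [ofList_push, ih tokens (p ++ [c])
              (by intro x hx; rcases List.mem_append.mp hx with h | h
                  · exact hp x h
                  · simp at h; subst h; exact hc)]
        simp

-- ===== VERDICT (by name: the statement is the Claim_ definition above) =====
theorem tokenizar_producao_spec : Claim_equal_tokenizar_producao := by
  intro direito terminais _hDom
  unfold Spec_tokenizar_producao tokenizar_producao tokenizar_producao_alt
  split_ifs
  · rfl
  · rfl
  · rfl
  · have h0 : ("" : String) = String.ofList [] := by simp
    rw [h0, tokALoop_eq terminais (PySem.Set.ofList terminais)
          (fun x => PySem.Set.mem_ofList terminais x) _ [] [] (by simp)]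
    simp
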